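-- pv_equiv track=rewrite | github.com/woong-jae/Algorithm-Crash | Programmers/[12987] 숫자 게임/JFe/12987.py | solution
-- ===== SOURCE A (Python) =====
-- def solution(A, B):
--     answer, pointer = 0, 0
--     A.sort()
--     B.sort()
--     # 오름차순 정렬한 A 값들을 오름차순 정렬한 B와 비교하면서 얻을 수 있는 승점 체크
--     for a in A:
--         # pointer가 B 길이까지 가거나 a보다 큰 B 값을 만날 때까지 pointer 증가
--         while pointer < len(B) and a >= B[pointer]: pointer += 1
--         # pointer가 B 길이 이상이 되면 더 이상 승점을 얻을 수 없으므로 break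
--         if pointer >= len(B): break
--         answer += 1
--         pointer += 1
--     return answer
-- ===== SOURCE B (Python) =====
-- def solution(A, B):
--     A.sort()
--     B.sort()
--
--     def ok(k):
--         # k wins are achievable iff the k largest B values beat, elementwise,
--         # the k smallest A values (matched in sorted order)
--         off = len(B) - k
--         return k <= len(A) and all(A[j] < B[off + j] for j in range(k))
--
--     lo, hi = 0, min(len(A), len(B))
--     # binary search the largest feasible win count (ok is downward monotone)
--     while lo < hi:
--         mid = (lo + hi + 1) // 2
--         if ok(mid):
--             lo = mid
--         else:
--             hi = mid - 1
--     return lo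
-- ===== Notes on version B (the rewrite author's own statement) =====
-- stated objective: alternative
-- what changed: Replaces A's greedy pointer scan over the sorted lists by a binary search on the achievable win count, deciding each candidate k with the feasibility check that the k largest B values beat the k smallest A values elementwise.
import Mathlib
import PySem

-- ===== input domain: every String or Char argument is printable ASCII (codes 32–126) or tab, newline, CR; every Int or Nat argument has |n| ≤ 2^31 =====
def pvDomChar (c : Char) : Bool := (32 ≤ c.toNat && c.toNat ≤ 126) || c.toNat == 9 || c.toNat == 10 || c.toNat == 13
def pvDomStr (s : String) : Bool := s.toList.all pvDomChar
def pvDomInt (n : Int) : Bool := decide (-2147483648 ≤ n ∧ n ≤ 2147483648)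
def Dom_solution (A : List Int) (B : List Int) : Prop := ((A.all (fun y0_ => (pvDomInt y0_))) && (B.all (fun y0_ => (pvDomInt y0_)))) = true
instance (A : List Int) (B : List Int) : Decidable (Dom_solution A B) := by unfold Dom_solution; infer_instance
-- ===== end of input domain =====

-- B replaces A's greedy pointer scan by a binary search on the achievable win count, deciding each
-- candidate k with the feasibility check "the k largest B values beat the k smallest A values
-- elementwise"; same return value. Both Pythons sort A and B in place (same mutation in A and B);
-- the equivalence proved here is about the return value.

-- ===== PORT A =====
-- while pointer < len(B) and a >= B[pointer]: pointer += 1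
def pvAdvance (a : Int) (Bs : List Int) (p : Nat) : Nat :=
  if p < Bs.length ∧ Bs.getD p 0 ≤ a then pvAdvance a Bs (p + 1) else p
termination_by Bs.length - p

-- for a in A: advance pointer; if pointer >= len(B): break; answer += 1; pointer += 1
def pvLoopA : List Int → List Int → Int → Nat → Int
  | [], _, answer, _ => answer
  | a :: rest, Bs, answer, pointer =>
    let p := pvAdvance a Bs pointer
    if Bs.length ≤ p then answer
    else pvLoopA rest Bs (answer + 1) (p + 1)

def solution (A : List Int) (B : List Int) : Int :=
  pvLoopA (PySem.List.sorted A (fun x => x) false) (PySem.List.sorted B (fun x => x) false) 0 0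

-- ===== PORT B =====
-- ok(k): k <= len(A) and all(A[j] < B[off+j] for j in range(k)), off = len(B) - k
-- (every call site of ok has 0 <= k <= min(len A, len B), so all indices are in range;
-- getD with a default transcribes the in-range accesses exactly)
def pvOk (As Bs : List Int) (k : Nat) : Bool :=
  decide (k ≤ As.length) &&
    (List.range k).all (fun j => decide (As.getD j 0 < Bs.getD (Bs.length - k + j) 0))

-- while lo < hi: mid = (lo+hi+1)//2; if ok(mid): lo = mid else: hi = mid - 1
def pvSearch (As Bs : List Int) (lo hi : Nat) : Nat :=
  if h : lo < hi then
    if pvOk As Bs ((lo + hi + 1) / 2) then pvSearch As Bs ((lo + hi + 1) / 2) hi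
    else pvSearch As Bs lo ((lo + hi + 1) / 2 - 1)
  else lo
termination_by hi - lo
decreasing_by all_goals omega

def solution_alt (A : List Int) (B : List Int) : Int :=
  let As := PySem.List.sorted A (fun x => x) false
  let Bs := PySem.List.sorted B (fun x => x) false
  (pvSearch As Bs 0 (min As.length Bs.length) : Int)

-- ===== PRECONDITION & SPEC =====
def Spec_solution (A : List Int) (B : List Int) (out : Int) : Prop := out = solution_alt A B
instance (A : List Int) (B : List Int) (out : Int) : Decidable (Spec_solution A B out) := by unfold Spec_solution; infer_instance

-- ===== CLAIM (what is proved, stated in full; the proofs are below) =====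
def Claim_equal_solution : Prop := ∀ (A : List Int) (B : List Int), Dom_solution A B → Spec_solution A B (solution A B)

-- ===== LEMMAS AND PROOFS =====

-- the value A's loop computes on two lists (merge-style greedy count)
def pvM : List Int → List Int → Int
  | [], _ => 0
  | _ :: _, [] => 0
  | a :: as, b :: bs => if b ≤ a then pvM (a :: as) bs else 1 + pvM as bs
termination_by as bs => (as.length, bs.length)

-- the same count as a Nat
def gN : List Int → List Int → Nat
  | [], _ => 0
  | _ :: _, [] => 0
  | a :: as, b :: bs => if b ≤ a then gN (a :: as) bs else 1 + gN as bs
termination_by as bs => (as.length, bs.length)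

theorem pvM_nil_right (as : List Int) : pvM as [] = 0 := by
  cases as <;> simp [pvM]

theorem pvM_dropWhile (a : Int) (as l : List Int) :
    pvM (a :: as) l = pvM (a :: as) (l.dropWhile (fun b => decide (b ≤ a))) := by
  induction l with
  | nil => rfl
  | cons b bs ih =>
    by_cases h : b ≤ a
    · simp [pvM, h, ih]
    · simp [pvM, h]

theorem pvAdvance_drop (a : Int) (Bs : List Int) (p : Nat) :
    List.drop (pvAdvance a Bs p) Bs = (List.drop p Bs).dropWhile (fun b => decide (b ≤ a)) := by
  rw [pvAdvance]
  split
  · rename_i h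
    obtain ⟨h1, h2⟩ := h
    rw [pvAdvance_drop a Bs (p + 1)]
    rw [List.drop_eq_getElem_cons h1, List.dropWhile_cons]
    have : Bs.getD p 0 = Bs[p] := List.getD_eq_getElem Bs 0 h1
    simp [this ▸ h2]
  · rename_i h
    push Not at h
    by_cases h1 : p < Bs.length
    · rw [List.drop_eq_getElem_cons h1, List.dropWhile_cons]
      have hg : Bs.getD p 0 = Bs[p] := List.getD_eq_getElem Bs 0 h1
      have := h h1
      rw [hg] at this
      simp [not_le.mpr this, ← List.drop_eq_getElem_cons h1]
    · rw [List.drop_eq_nil_of_le (by omega)]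
      rfl
termination_by Bs.length - p

theorem pvLoopA_eq (as : List Int) (Bs : List Int) :
    ∀ (ans : Int) (p : Nat), pvLoopA as Bs ans p = ans + pvM as (List.drop p Bs) := by
  induction as with
  | nil => intro ans p; simp [pvLoopA, pvM]
  | cons a rest ih =>
    intro ans p
    rw [pvLoopA]
    have hdrop := pvAdvance_drop a Bs p
    set q := pvAdvance a Bs p with hq
    rw [pvM_dropWhile a rest (List.drop p Bs), ← hdrop]
    split
    · rename_i hle
      rw [List.drop_eq_nil_of_le hle, pvM_nil_right]
      omega
    · rename_i hlt
      have hq2 : q < Bs.length := by omega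
      rw [List.drop_eq_getElem_cons hq2]
      have hhead : ¬ (Bs[q] ≤ a) := by
        have hmem : List.dropWhile (fun b => decide (b ≤ a)) (List.drop p Bs)
            = Bs[q] :: List.drop (q + 1) Bs := by
          rw [← hdrop, List.drop_eq_getElem_cons hq2]
        have h0 := List.head?_dropWhile_not (fun b => decide (b ≤ a)) (List.drop p Bs)
        rw [hmem] at h0
        simp only [List.head?_cons, decide_eq_false_iff_not] at h0
        exact h0
      rw [pvM, if_neg hhead, ih]
      ring

theorem pvM_eq_gN (as bs : List Int) : pvM as bs = (gN as bs : Int) := by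
  induction as, bs using gN.induct with
  | case1 bs => simp [pvM, gN]
  | case2 a as => simp [pvM, gN]
  | case3 a as b bs h ih => rw [pvM, gN, if_pos h, if_pos h, ih]
  | case4 a as b bs h ih => rw [pvM, gN, if_neg h, if_neg h, ih]; push_cast; ring

-- k wins are feasible: the k largest of Bs beat the k smallest of As elementwise
def feas (As Bs : List Int) (k : Nat) : Prop :=
  k ≤ As.length ∧ k ≤ Bs.length ∧
    ∀ j < k, As.getD j 0 < Bs.getD (Bs.length - k + j) 0

-- the greedy count is feasible (needs Bs sorted)
theorem gN_feas (As Bs : List Int) (hB : Bs.Pairwise (· ≤ ·)) : feas As Bs (gN As Bs) := by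
  induction As, Bs using gN.induct with
  | case1 bs => refine ⟨?_, ?_, ?_⟩ <;> simp [gN]
  | case2 a as => refine ⟨?_, ?_, ?_⟩ <;> simp [gN]
  | case3 a as b bs h ih =>
    obtain ⟨h1, h2, h3⟩ := ih (List.Pairwise.sublist (List.sublist_cons_self b bs) hB)
    rw [gN, if_pos h]
    refine ⟨h1, by simp only [List.length_cons]; omega, ?_⟩
    intro j hj
    have hidx : (b :: bs).length - gN (a :: as) bs + j
        = (bs.length - gN (a :: as) bs + j) + 1 := by
      simp only [List.length_cons]; omega
    rw [hidx, List.getD_cons_succ]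
    exact h3 j hj
  | case4 a as b bs h ih =>
    obtain ⟨h1, h2, h3⟩ := ih (List.Pairwise.sublist (List.sublist_cons_self b bs) hB)
    rw [gN, if_neg h]
    refine ⟨by simp only [List.length_cons]; omega, by simp only [List.length_cons]; omega, ?_⟩
    intro j hj
    match j with
    | 0 =>
      have hidx : (b :: bs).length - (1 + gN as bs) + 0 = bs.length - gN as bs := by
        simp only [List.length_cons]; omega
      rw [hidx, List.getD_cons_zero]
      by_cases hc : gN as bs < bs.length
      · have hlt : bs.length - gN as bs = (bs.length - 1 - gN as bs) + 1 := by omega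
        rw [hlt, List.getD_cons_succ]
        have hi2 : bs.length - 1 - gN as bs < bs.length := by omega
        have hm : bs.getD (bs.length - 1 - gN as bs) 0 = bs[bs.length - 1 - gN as bs] :=
          List.getD_eq_getElem bs 0 hi2
        have hble : b ≤ bs[bs.length - 1 - gN as bs] :=
          (List.pairwise_cons.mp hB).1 _ (List.getElem_mem hi2)
        rw [hm]
        omega
      · have : bs.length - gN as bs = 0 := by omega
        rw [this, List.getD_cons_zero]
        omega
    | j' + 1 =>
      have hidx : (b :: bs).length - (1 + gN as bs) + (j' + 1)
          = (bs.length - gN as bs + j') + 1 := by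
        simp only [List.length_cons]; omega
      rw [hidx, List.getD_cons_succ, List.getD_cons_succ]
      exact h3 j' (by omega)

-- any feasible count is at most the greedy count
theorem feas_le_gN (As Bs : List Int) : ∀ k, feas As Bs k → k ≤ gN As Bs := by
  induction As, Bs using gN.induct with
  | case1 bs =>
    intro k hk
    have := hk.1
    simp only [List.length_nil, Nat.le_zero] at this
    simp [gN, this]
  | case2 a as =>
    intro k hk
    have := hk.2.1
    simp only [List.length_nil, Nat.le_zero] at this
    simp [gN, this]
  | case3 a as b bs h ih =>
    intro k hk
    obtain ⟨h1, h2, h3⟩ := hk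
    rw [gN, if_pos h]
    have hkb : k ≤ bs.length := by
      by_contra hc
      have hk1 : k = bs.length + 1 := by simp only [List.length_cons] at h2; omega
      have := h3 0 (by omega)
      rw [List.getD_cons_zero] at this
      have hidx : (b :: bs).length - k + 0 = 0 := by simp only [List.length_cons]; omega
      rw [hidx, List.getD_cons_zero] at this
      omega
    refine ih k ⟨h1, hkb, ?_⟩
    intro j hj
    have := h3 j hj
    have hidx : (b :: bs).length - k + j = (bs.length - k + j) + 1 := by
      simp only [List.length_cons]; omega
    rw [hidx, List.getD_cons_succ] at this
    exact this
  | case4 a as b bs h ih =>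
    intro k hk
    obtain ⟨h1, h2, h3⟩ := hk
    rw [gN, if_neg h]
    match k with
    | 0 => omega
    | k' + 1 =>
      have hk' : k' ≤ gN as bs := by
        refine ih k' ⟨by simpa using h1, by simpa using h2, ?_⟩
        intro j hj
        have := h3 (j + 1) (by omega)
        rw [List.getD_cons_succ] at this
        have hidx : (b :: bs).length - (k' + 1) + (j + 1) = (bs.length - k' + j) + 1 := by
          simp only [List.length_cons] at h2 ⊢; omega
        rw [hidx, List.getD_cons_succ] at this
        exact this
      omega

-- feasibility is downward monotone (needs Bs sorted)
theorem feas_pred (As Bs : List Int) (hB : Bs.Pairwise (· ≤ ·)) (k : Nat)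
    (h : feas As Bs (k + 1)) : feas As Bs k := by
  obtain ⟨h1, h2, h3⟩ := h
  refine ⟨by omega, by omega, ?_⟩
  intro j hj
  have hstep := h3 j (by omega)
  have hidx : Bs.length - k + j = (Bs.length - (k + 1) + j) + 1 := by omega
  have hi1 : Bs.length - (k + 1) + j < Bs.length := by omega
  have hi2 : Bs.length - k + j < Bs.length := by omega
  have hle : Bs[Bs.length - (k + 1) + j] ≤ Bs[Bs.length - k + j] :=
    (List.pairwise_iff_getElem.mp hB) _ _ hi1 hi2 (by omega)
  rw [List.getD_eq_getElem Bs 0 hi1] at hstep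
  rw [List.getD_eq_getElem Bs 0 hi2]
  omega

theorem feas_of_le (As Bs : List Int) (hB : Bs.Pairwise (· ≤ ·)) :
    ∀ d k, feas As Bs (k + d) → feas As Bs k := by
  intro d
  induction d with
  | zero => intro k h; exact h
  | succ d' ih =>
    intro k h
    exact ih k (feas_pred As Bs hB (k + d') (by rwa [← Nat.add_assoc] at h))

theorem pvOk_iff (As Bs : List Int) (k : Nat) (hk : k ≤ Bs.length) :
    pvOk As Bs k = true ↔ feas As Bs k := by
  unfold pvOk feas
  simp only [Bool.and_eq_true, decide_eq_true_eq, List.all_eq_true, List.mem_range]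
  constructor
  · rintro ⟨ha, hall⟩
    exact ⟨ha, hk, fun j hj => by simpa using hall j hj⟩
  · rintro ⟨ha, _, hall⟩
    exact ⟨ha, fun j hj => by simpa using hall j hj⟩

-- the binary search returns g when pvOk decides exactly "k ≤ g" on (lo, hi]
theorem pvSearch_eq (As Bs : List Int) (g : Nat) (lo hi : Nat)
    (h1 : lo ≤ g) (h2 : g ≤ hi)
    (h3 : ∀ k, lo < k → k ≤ hi → (pvOk As Bs k = true ↔ k ≤ g)) :
    pvSearch As Bs lo hi = g := by
  induction lo, hi using pvSearch.induct (As := As) (Bs := Bs) with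
  | case1 lo hi h hok ih =>
    have hmid1 : lo < (lo + hi + 1) / 2 := by omega
    have hmid2 : (lo + hi + 1) / 2 ≤ hi := by omega
    have hmg : (lo + hi + 1) / 2 ≤ g := (h3 _ hmid1 hmid2).mp hok
    rw [pvSearch, dif_pos h, if_pos hok]
    exact ih hmg h2 (fun k hk1 hk2 => h3 k (by omega) hk2)
  | case2 lo hi h hok ih =>
    have hmid1 : lo < (lo + hi + 1) / 2 := by omega
    have hmid2 : (lo + hi + 1) / 2 ≤ hi := by omega
    have hgm : g < (lo + hi + 1) / 2 := by
      by_contra hc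
      exact absurd ((h3 _ hmid1 hmid2).mpr (by omega)) (by simp [hok])
    rw [pvSearch, dif_pos h, if_neg (by simp [hok])]
    exact ih h1 (by omega) (fun k hk1 hk2 => h3 k hk1 (by omega))
  | case3 lo hi h =>
    rw [pvSearch, dif_neg h]
    omega

-- ===== VERDICT (by name: the statement is the Claim_ definition above) =====
theorem solution_spec : Claim_equal_solution := by
  intro A B _
  unfold Spec_solution solution solution_alt
  simp only []
  set As := PySem.List.sorted A (fun x => x) false with hAs
  set Bs := PySem.List.sorted B (fun x => x) false with hBs
  have hB : Bs.Pairwise (· ≤ ·) := by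
    have := PySem.List.sorted_pairwise (xs := B) (key := fun x => x)
    simpa [hBs] using this
  have hfeas := gN_feas As Bs hB
  have hf1 := hfeas.1
  have hf2 := hfeas.2.1
  have hsearch : pvSearch As Bs 0 (min As.length Bs.length) = gN As Bs := by
    refine pvSearch_eq As Bs (gN As Bs) 0 (min As.length Bs.length)
      (Nat.zero_le _) (by omega) ?_
    intro k _ hk2
    rw [pvOk_iff As Bs k (by omega)]
    constructor
    · exact feas_le_gN As Bs k
    · intro hkg
      exact feas_of_le As Bs hB (gN As Bs - k) k (by rwa [Nat.add_sub_cancel' hkg])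
  rw [pvLoopA_eq, List.drop_zero, pvM_eq_gN, hsearch]
  ring
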